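-- pv_equiv track=rewrite | github.com/JiangYingEr/LTD | controller.py | _diff_topology
-- ===== SOURCE A (Python) =====
-- def format_link(dst_switch_id, dst_port, src_switch_id, src_port_id):
--     return "s{}:{} -> s{}:{}".format(src_switch_id, src_port_id, dst_switch_id, dst_port)
--
-- def _diff_topology(switch_id, old_links, new_links):
--     events = []
--     all_ports = sorted(set(old_links.keys()) | set(new_links.keys()))
--     for port in all_ports:
--         old_link = old_links.get(port)
--         new_link = new_links.get(port)
--         if old_link is None and new_link is not None:
--             events.append("new link: {}".format(format_link(switch_id, port, new_link[0], new_link[1])))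
--         elif old_link is not None and new_link is None:
--             events.append("removed link: {}".format(format_link(switch_id, port, old_link[0], old_link[1])))
--         elif old_link is not None and new_link is not None and old_link != new_link:
--             events.append(
--                 "changed link on s{}:{}: {} => {}".format(
--                     switch_id,
--                     port,
--                     format_link(switch_id, port, old_link[0], old_link[1]),
--                     format_link(switch_id, port, new_link[0], new_link[1]),
--                 )
--             )
--     return events
-- ===== SOURCE B (Python) =====
-- def format_link(dst_switch_id, dst_port, src_switch_id, src_port_id):
--     return "s{}:{} -> s{}:{}".format(src_switch_id, src_port_id, dst_switch_id, dst_port)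
--
-- def _diff_topology(switch_id, old_links, new_links):
--     old_keys = set(old_links)
--     new_keys = set(new_links)
--     pairs = [
--         (p, "new link: {}".format(format_link(switch_id, p, new_links[p][0], new_links[p][1])))
--         for p in new_keys - old_keys
--     ]
--     pairs += [
--         (p, "removed link: {}".format(format_link(switch_id, p, old_links[p][0], old_links[p][1])))
--         for p in old_keys - new_keys
--     ]
--     pairs += [
--         (p, "changed link on s{}:{}: {} => {}".format(
--             switch_id, p,
--             format_link(switch_id, p, old_links[p][0], old_links[p][1]),
--             format_link(switch_id, p, new_links[p][0], new_links[p][1])))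
--         for p in old_keys & new_keys
--         if old_links[p] != new_links[p]
--     ]
--     pairs.sort(key=lambda t: t[0])
--     return [s for _, s in pairs]
-- ===== Notes on version B (the rewrite author's own statement) =====
-- stated objective: alternative
-- what changed: Replaces A's single scan over the sorted key union with a branch per port by three separate set-difference/intersection passes (added, removed, changed) that build (port, event) pairs, concatenated and sorted by port at the end.
import Mathlib
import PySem

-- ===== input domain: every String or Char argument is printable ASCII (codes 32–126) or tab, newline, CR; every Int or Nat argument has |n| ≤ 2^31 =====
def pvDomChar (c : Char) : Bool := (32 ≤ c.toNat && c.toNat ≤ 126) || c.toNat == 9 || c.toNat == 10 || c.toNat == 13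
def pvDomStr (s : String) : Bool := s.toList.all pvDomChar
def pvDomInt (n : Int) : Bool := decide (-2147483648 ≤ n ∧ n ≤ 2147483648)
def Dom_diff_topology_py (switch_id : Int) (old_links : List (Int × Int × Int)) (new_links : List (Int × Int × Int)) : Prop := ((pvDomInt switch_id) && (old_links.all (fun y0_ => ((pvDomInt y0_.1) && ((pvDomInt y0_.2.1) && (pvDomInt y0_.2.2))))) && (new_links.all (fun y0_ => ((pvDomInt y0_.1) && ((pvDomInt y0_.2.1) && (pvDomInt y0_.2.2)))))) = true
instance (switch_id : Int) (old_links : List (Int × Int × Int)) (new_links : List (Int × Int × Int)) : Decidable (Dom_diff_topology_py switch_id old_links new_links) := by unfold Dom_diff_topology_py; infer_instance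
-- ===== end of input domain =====

-- B replaces A's single branch-per-port scan of the sorted key union by three set-operation
-- passes (added / removed / changed) building (port, event) pairs, merged by a final sort by port
-- (objective: alternative decomposition, same cost).


-- ===== PORT A =====
-- shared helper: dict lookup d.get(k) on the association list (first match)
def pvGet (d : List (Int × Int × Int)) (k : Int) : Option (Int × Int) :=
  (d.find? (fun e => e.1 == k)).map (fun e => e.2)

-- helper format_link (shared by both Pythons)
def pvFormatLink (dst_switch_id dst_port src_switch_id src_port_id : Int) : String :=
  "s" ++ PySem.Int.toStr src_switch_id ++ ":" ++ PySem.Int.toStr src_port_id ++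
  " -> s" ++ PySem.Int.toStr dst_switch_id ++ ":" ++ PySem.Int.toStr dst_port

def diff_topology_py (switch_id : Int) (old_links : List (Int × Int × Int)) (new_links : List (Int × Int × Int)) : List String :=
  let all_ports := PySem.List.sorted
    (PySem.Set.union (PySem.Set.ofList (old_links.map (·.1))) (PySem.Set.ofList (new_links.map (·.1))))
    (fun x => x) false
  all_ports.foldl (fun events port =>
    match pvGet old_links port, pvGet new_links port with
    | none, some new_link =>
        events ++ ["new link: " ++ pvFormatLink switch_id port new_link.1 new_link.2]
    | some old_link, none =>
        events ++ ["removed link: " ++ pvFormatLink switch_id port old_link.1 old_link.2]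
    | some old_link, some new_link =>
        if old_link ≠ new_link then
          events ++ ["changed link on s" ++ PySem.Int.toStr switch_id ++ ":" ++ PySem.Int.toStr port ++ ": " ++
            pvFormatLink switch_id port old_link.1 old_link.2 ++ " => " ++
            pvFormatLink switch_id port new_link.1 new_link.2]
        else events
    | none, none => events) []

-- ===== PORT B =====
def diff_topology_py_alt (switch_id : Int) (old_links : List (Int × Int × Int)) (new_links : List (Int × Int × Int)) : List String :=
  let old_keys := PySem.Set.ofList (old_links.map (·.1))
  let new_keys := PySem.Set.ofList (new_links.map (·.1))
  let added := (PySem.Set.diff new_keys old_keys).filterMap (fun p =>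
    (pvGet new_links p).map (fun nl => (p, "new link: " ++ pvFormatLink switch_id p nl.1 nl.2)))
  let removed := (PySem.Set.diff old_keys new_keys).filterMap (fun p =>
    (pvGet old_links p).map (fun ol => (p, "removed link: " ++ pvFormatLink switch_id p ol.1 ol.2)))
  let changed := (PySem.Set.inter old_keys new_keys).filterMap (fun p =>
    match pvGet old_links p, pvGet new_links p with
    | some ol, some nl =>
        if ol ≠ nl then
          some (p, "changed link on s" ++ PySem.Int.toStr switch_id ++ ":" ++ PySem.Int.toStr p ++ ": " ++
            pvFormatLink switch_id p ol.1 ol.2 ++ " => " ++ pvFormatLink switch_id p nl.1 nl.2)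
        else none
    | _, _ => none)
  let pairs := added ++ removed ++ changed
  (PySem.List.sorted pairs (fun t => t.1) false).map (fun t => t.2)

-- ===== PRECONDITION & SPEC =====
def Spec_diff_topology_py (switch_id : Int) (old_links : List (Int × Int × Int)) (new_links : List (Int × Int × Int)) (out : List String) : Prop := out = diff_topology_py_alt switch_id old_links new_links
instance (switch_id : Int) (old_links : List (Int × Int × Int)) (new_links : List (Int × Int × Int)) (out : List String) : Decidable (Spec_diff_topology_py switch_id old_links new_links out) := by unfold Spec_diff_topology_py; infer_instance

-- ===== CLAIM (what is proved, stated in full; the proofs are below) =====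
def Claim_equal_diff_topology_py : Prop := ∀ (switch_id : Int) (old_links : List (Int × Int × Int)) (new_links : List (Int × Int × Int)), Dom_diff_topology_py switch_id old_links new_links → Spec_diff_topology_py switch_id old_links new_links (diff_topology_py switch_id old_links new_links)

-- ===== LEMMAS AND PROOFS =====

-- the event A emits for a given port (as an Option), the common yardstick of both ports
def pvEventOf (switch_id : Int) (old_links new_links : List (Int × Int × Int)) (port : Int) : Option String :=
  match pvGet old_links port, pvGet new_links port with
  | none, some nl => some ("new link: " ++ pvFormatLink switch_id port nl.1 nl.2)
  | some ol, none => some ("removed link: " ++ pvFormatLink switch_id port ol.1 ol.2)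
  | some ol, some nl =>
      if ol ≠ nl then
        some ("changed link on s" ++ PySem.Int.toStr switch_id ++ ":" ++ PySem.Int.toStr port ++ ": " ++
          pvFormatLink switch_id port ol.1 ol.2 ++ " => " ++ pvFormatLink switch_id port nl.1 nl.2)
      else none
  | none, none => none

-- pvGet is none exactly off the key list
lemma pvGet_eq_none_iff (d : List (Int × Int × Int)) (k : Int) :
    pvGet d k = none ↔ k ∉ d.map (·.1) := by
  simp only [pvGet, Option.map_eq_none_iff, List.find?_eq_none, List.mem_map, beq_iff_eq]
  constructor
  · rintro h ⟨e, he, rfl⟩; exact h e he rfl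
  · intro h e he heq; exact h ⟨e, he, heq⟩

lemma pvGet_isSome_iff (d : List (Int × Int × Int)) (k : Int) :
    (pvGet d k).isSome ↔ k ∈ d.map (·.1) := by
  rw [Option.isSome_iff_ne_none, ne_eq, pvGet_eq_none_iff]
  exact not_not

-- A's loop computes the filterMap of pvEventOf over the sorted port list
lemma foldlA_eq_filterMap (switch_id : Int) (old_links new_links : List (Int × Int × Int))
    (l : List Int) (acc : List String) :
    l.foldl (fun events port =>
      match pvGet old_links port, pvGet new_links port with
      | none, some new_link =>
          events ++ ["new link: " ++ pvFormatLink switch_id port new_link.1 new_link.2]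
      | some old_link, none =>
          events ++ ["removed link: " ++ pvFormatLink switch_id port old_link.1 old_link.2]
      | some old_link, some new_link =>
          if old_link ≠ new_link then
            events ++ ["changed link on s" ++ PySem.Int.toStr switch_id ++ ":" ++ PySem.Int.toStr port ++ ": " ++
              pvFormatLink switch_id port old_link.1 old_link.2 ++ " => " ++
              pvFormatLink switch_id port new_link.1 new_link.2]
          else events
      | none, none => events) acc
    = acc ++ l.filterMap (pvEventOf switch_id old_links new_links) := by
  induction l generalizing acc with
  | nil => simp
  | cons p t ih =>
      rw [List.foldl_cons, ih, List.filterMap_cons]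
      rcases ho : pvGet old_links p with _ | ol <;> rcases hn : pvGet new_links p with _ | nl <;>
        simp [pvEventOf, ho, hn]
      split_ifs <;> simp

-- B's body with the lets substituted (definitional)
lemma alt_unfold (switch_id : Int) (old_links new_links : List (Int × Int × Int)) :
    diff_topology_py_alt switch_id old_links new_links =
    (PySem.List.sorted
      ((PySem.Set.diff (PySem.Set.ofList (new_links.map (·.1))) (PySem.Set.ofList (old_links.map (·.1)))).filterMap (fun p =>
        (pvGet new_links p).map (fun nl => (p, "new link: " ++ pvFormatLink switch_id p nl.1 nl.2))) ++
       (PySem.Set.diff (PySem.Set.ofList (old_links.map (·.1))) (PySem.Set.ofList (new_links.map (·.1)))).filterMap (fun p =>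
        (pvGet old_links p).map (fun ol => (p, "removed link: " ++ pvFormatLink switch_id p ol.1 ol.2))) ++
       (PySem.Set.inter (PySem.Set.ofList (old_links.map (·.1))) (PySem.Set.ofList (new_links.map (·.1)))).filterMap (fun p =>
        match pvGet old_links p, pvGet new_links p with
        | some ol, some nl =>
            if ol ≠ nl then
              some (p, "changed link on s" ++ PySem.Int.toStr switch_id ++ ":" ++ PySem.Int.toStr p ++ ": " ++
                pvFormatLink switch_id p ol.1 ol.2 ++ " => " ++ pvFormatLink switch_id p nl.1 nl.2)
            else none
        | _, _ => none))
      (fun t => t.1) false).map (fun t => t.2) := rfl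

theorem diff_topology_py_spec_aux (switch_id : Int) (old_links new_links : List (Int × Int × Int)) :
    diff_topology_py switch_id old_links new_links = diff_topology_py_alt switch_id old_links new_links := by
  unfold diff_topology_py
  rw [alt_unfold]
  set oldK := PySem.Set.ofList (old_links.map (·.1)) with holdK
  set newK := PySem.Set.ofList (new_links.map (·.1)) with hnewK
  set U := PySem.List.sorted (PySem.Set.union oldK newK) (fun x => x) false with hU
  set ev := pvEventOf switch_id old_links new_links with hev
  -- the pair each port contributes
  set pairOf : Int → Option (Int × String) := fun p => (ev p).map (fun s => (p, s)) with hpairOf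
  have hmemO : ∀ p, p ∈ oldK ↔ (pvGet old_links p).isSome := by
    intro p; rw [holdK, PySem.Set.mem_ofList, pvGet_isSome_iff]
  have hmemN : ∀ p, p ∈ newK ↔ (pvGet new_links p).isSome := by
    intro p; rw [hnewK, PySem.Set.mem_ofList, pvGet_isSome_iff]
  -- A = U.filterMap ev
  rw [foldlA_eq_filterMap, List.nil_append, ← hev]
  -- each of B's three lists is a filterMap of pairOf over its set
  have hadded : (PySem.Set.diff newK oldK).filterMap (fun p =>
      (pvGet new_links p).map (fun nl => (p, "new link: " ++ pvFormatLink switch_id p nl.1 nl.2)))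
      = (PySem.Set.diff newK oldK).filterMap pairOf := by
    apply List.filterMap_congr
    intro p hp
    rw [PySem.Set.mem_diff] at hp
    have ho : pvGet old_links p = none := by
      rw [← Option.not_isSome_iff_eq_none, ← hmemO]; exact hp.2
    have hn := (hmemN p).1 hp.1
    rcases Option.isSome_iff_exists.1 hn with ⟨nl, hnl⟩
    simp [hpairOf, hev, pvEventOf, ho, hnl]
  have hremoved : (PySem.Set.diff oldK newK).filterMap (fun p =>
      (pvGet old_links p).map (fun ol => (p, "removed link: " ++ pvFormatLink switch_id p ol.1 ol.2)))
      = (PySem.Set.diff oldK newK).filterMap pairOf := by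
    apply List.filterMap_congr
    intro p hp
    rw [PySem.Set.mem_diff] at hp
    have hn : pvGet new_links p = none := by
      rw [← Option.not_isSome_iff_eq_none, ← hmemN]; exact hp.2
    rcases Option.isSome_iff_exists.1 ((hmemO p).1 hp.1) with ⟨ol, hol⟩
    simp [hpairOf, hev, pvEventOf, hn, hol]
  have hchanged : (PySem.Set.inter oldK newK).filterMap (fun p =>
      match pvGet old_links p, pvGet new_links p with
      | some ol, some nl =>
          if ol ≠ nl then
            some (p, "changed link on s" ++ PySem.Int.toStr switch_id ++ ":" ++ PySem.Int.toStr p ++ ": " ++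
              pvFormatLink switch_id p ol.1 ol.2 ++ " => " ++ pvFormatLink switch_id p nl.1 nl.2)
          else none
      | _, _ => none)
      = (PySem.Set.inter oldK newK).filterMap pairOf := by
    apply List.filterMap_congr
    intro p hp
    rw [PySem.Set.mem_inter] at hp
    rcases Option.isSome_iff_exists.1 ((hmemO p).1 hp.1) with ⟨ol, hol⟩
    rcases Option.isSome_iff_exists.1 ((hmemN p).1 hp.2) with ⟨nl, hnl⟩
    by_cases h : ol = nl <;> simp [hpairOf, hev, pvEventOf, hol, hnl, h]
  rw [hadded, hremoved, hchanged]
  -- the three index sets are a permutation of the key union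
  have hperm : ((PySem.Set.diff newK oldK) ++ (PySem.Set.diff oldK newK) ++ (PySem.Set.inter oldK newK)).Perm
      (PySem.Set.union oldK newK) := by
    have hndO : List.Nodup oldK := PySem.Set.nodup_ofList _
    have hndN : List.Nodup newK := PySem.Set.nodup_ofList _
    apply (List.perm_ext_iff_of_nodup _ (PySem.Set.nodup_union _ _ hndO)).2
    · intro a
      simp only [List.mem_append, PySem.Set.mem_diff, PySem.Set.mem_inter, PySem.Set.mem_union]
      tauto
    · rw [List.append_assoc]
      refine ((PySem.Set.nodup_diff _ _ hndN).append ((PySem.Set.nodup_diff _ _ hndO).append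
        (PySem.Set.nodup_inter _ _ hndO) ?_) ?_)
      · intro a ha hb
        rw [PySem.Set.mem_diff] at ha; rw [PySem.Set.mem_inter] at hb
        exact ha.2 hb.2
      · intro a ha hb
        rw [PySem.Set.mem_diff] at ha
        rcases List.mem_append.1 hb with hb | hb
        · rw [PySem.Set.mem_diff] at hb; exact ha.2 hb.1
        · rw [PySem.Set.mem_inter] at hb; exact ha.2 hb.1
  -- name the sorted order of B's pairs: it is U.filterMap pairOf
  have hUperm : (U.filterMap pairOf).Perm
      (((PySem.Set.diff newK oldK).filterMap pairOf ++ (PySem.Set.diff oldK newK).filterMap pairOf ++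
        (PySem.Set.inter oldK newK).filterMap pairOf)) := by
    have h1 : (U.filterMap pairOf).Perm ((PySem.Set.union oldK newK).filterMap pairOf) :=
      (PySem.List.sorted_perm _ _ _).filterMap pairOf
    have h2 := (hperm.filterMap pairOf).symm
    simp only [List.filterMap_append] at h2
    exact h1.trans h2
  have hltU : U.Pairwise (· < ·) := by
    have h1 : U.Pairwise (· ≤ ·) := PySem.List.sorted_pairwise _ _
    have h2 : U.Nodup := (PySem.List.sorted_perm _ _ _).nodup_iff.2
      (PySem.Set.nodup_union _ _ (PySem.Set.nodup_ofList _))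
    exact (h1.and h2).imp (fun h => lt_of_le_of_ne h.1 h.2)
  have hltP : (U.filterMap pairOf).Pairwise (fun a b => a.1 < b.1) := by
    rw [List.pairwise_filterMap]
    refine hltU.imp ?_
    intro a b hab x hx y hy
    have hxa : x.1 = a := by
      rcases Option.map_eq_some_iff.1 hx with ⟨s, _, rfl⟩; rfl
    have hyb : y.1 = b := by
      rcases Option.map_eq_some_iff.1 hy with ⟨s, _, rfl⟩; rfl
    rw [hxa, hyb]; exact hab
  rw [PySem.List.sorted_eq_of_perm_of_pairwise_lt _ _ _ hUperm hltP]
  rw [List.map_filterMap]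
  apply List.filterMap_congr
  intro p _
  simp [hpairOf]

-- ===== VERDICT (by name: the statement is the Claim_ definition above) =====
theorem diff_topology_py_spec : Claim_equal_diff_topology_py := by
  intro switch_id old_links new_links _
  unfold Spec_diff_topology_py
  exact diff_topology_py_spec_aux switch_id old_links new_links
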